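-- pv_equiv track=rewrite | github.com/lewistransts/AgentCrew | modules/ytdlp/service.py | _process_all_subtitles
-- ===== SOURCE A (Python) =====
-- def _process_all_subtitles(lines: list) -> str:
--     """Process all subtitles without chapter filtering."""
--     processed_lines = []
--
--     # Skip header lines
--     start_processing = False
--     current_text = ""
--
--     for line in lines:
--         # Skip empty lines and timing information
--         if not line.strip():
--             continue
--
--         # Skip VTT header
--         if not start_processing:
--             if line.strip() and not line.startswith('WEBVTT'):
--                 start_processing = True
--             else:
--                 continue
--
--         # Skip timing lines (they contain --> )
--         if '-->' in line:
--             continue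
--
--         # Skip lines with just numbers (timestamp indices)
--         if line.strip().isdigit():
--             continue
--
--         # Add non-empty content lines
--         if line.strip():
--             if current_text and not current_text.endswith('.'):
--                 current_text += " "
--             current_text += line.strip()
--
--             # If line ends with period, add to processed lines
--             if line.strip().endswith('.'):
--                 processed_lines.append(current_text)
--                 current_text = ""
--
--     # Add any remaining text
--     if current_text:
--         processed_lines.append(current_text)
--
--     return '\n'.join(processed_lines)
-- ===== SOURCE B (Python) =====
-- def _process_all_subtitles(lines: list) -> str:
--     """Process all subtitles without chapter filtering."""
--     # 1) find the first content line (skip blank and WEBVTT header lines)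
--     start = 0
--     while start < len(lines) and (not lines[start].strip() or lines[start].startswith('WEBVTT')):
--         start += 1
--     # 2) keep only real content lines, already stripped
--     content = [line.strip() for line in lines[start:]
--                if line.strip() and '-->' not in line and not line.strip().isdigit()]
--     # 3) group lines into sentences: close a group when a line ends with '.'
--     sentences, acc = [], []
--     for text in content:
--         acc.append(text)
--         if text.endswith('.'):
--             sentences.append(' '.join(acc))
--             acc = []
--     if acc:
--         sentences.append(' '.join(acc))
--     return '\n'.join(sentences)
-- ===== Notes on version B (the rewrite author's own statement) =====
-- stated objective: simpler
-- what changed: Replaces A's single stateful loop (start flag, growing current_text string with an endswith-'.' separator test) by three plain phases: compute the header end index, filter-and-strip the content lines in one comprehension, then group the filtered lines into sentences with ' '.join, exploiting that a pending group never ends with '.'.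
import Mathlib
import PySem

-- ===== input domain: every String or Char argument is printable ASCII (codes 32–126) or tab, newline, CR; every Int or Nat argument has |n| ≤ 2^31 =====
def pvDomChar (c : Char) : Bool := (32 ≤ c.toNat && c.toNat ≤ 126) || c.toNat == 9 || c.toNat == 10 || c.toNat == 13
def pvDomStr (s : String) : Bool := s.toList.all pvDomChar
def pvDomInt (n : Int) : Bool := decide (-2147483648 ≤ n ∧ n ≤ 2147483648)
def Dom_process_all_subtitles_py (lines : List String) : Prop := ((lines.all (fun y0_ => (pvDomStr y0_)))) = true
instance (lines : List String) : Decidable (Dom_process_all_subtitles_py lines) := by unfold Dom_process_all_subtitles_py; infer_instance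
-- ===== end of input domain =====

-- B replaces A's single stateful loop by three phases (header index, filter/strip, sentence grouping); objective: simpler.


-- ===== PORT A =====
-- the body of A's loop once past the header checks (timing / digit / accumulate part)
def pyBodyA (processed : List String) (cur : String) (line : String) :
    List String × String :=
  if PySem.Str.isIn "-->" line then (processed, cur)
  else if PySem.Str.strIsdigit (PySem.Str.strip line) then (processed, cur)
  else if PySem.Str.strip line ≠ "" then
    let cur1 := if cur ≠ "" ∧ PySem.Str.endswith cur "." = false then cur ++ " " else cur
    let cur2 := cur1 ++ PySem.Str.strip line
    if PySem.Str.endswith (PySem.Str.strip line) "." then (processed ++ [cur2], "")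
    else (processed, cur2)
  else (processed, cur)

def pyStepA (st : List String × Bool × String) (line : String) :
    List String × Bool × String :=
  let (processed, start, cur) := st
  if PySem.Str.strip line = "" then (processed, start, cur)
  else if start = false then
    if PySem.Str.strip line ≠ "" ∧ PySem.Str.startswith line "WEBVTT" = false then
      let pc := pyBodyA processed cur line
      (pc.1, true, pc.2)
    else (processed, start, cur)
  else
    let pc := pyBodyA processed cur line
    (pc.1, start, pc.2)

def process_all_subtitles_py (lines : List String) : String :=
  let st := lines.foldl pyStepA ([], false, "")
  let processed := if st.2.2 ≠ "" then st.1 ++ [st.2.2] else st.1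
  PySem.Str.join "\n" processed

-- ===== PORT B =====
-- phase 1: drop the header (blank and WEBVTT lines before the first content line)
def altSkipHeader : List String → List String
  | [] => []
  | l :: ls =>
    if PySem.Str.strip l = "" || PySem.Str.startswith l "WEBVTT" then altSkipHeader ls
    else l :: ls

-- phase 2: the comprehension's condition; content lines, already stripped
def altKeep (l : String) : Bool :=
  PySem.Str.strip l != "" && !PySem.Str.isIn "-->" l && !PySem.Str.strIsdigit (PySem.Str.strip l)

def altContent (ls : List String) : List String :=
  (ls.filter altKeep).map PySem.Str.strip

-- phase 3: group content lines into sentences, closing a group at a line ending with '.'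
def altGroupStep (st : List String × List String) (t : String) : List String × List String :=
  let acc := st.2 ++ [t]
  if PySem.Str.endswith t "." then (st.1 ++ [PySem.Str.join " " acc], [])
  else (st.1, acc)

def process_all_subtitles_py_alt (lines : List String) : String :=
  let st := (altContent (altSkipHeader lines)).foldl altGroupStep ([], [])
  let sentences := if st.2 ≠ [] then st.1 ++ [PySem.Str.join " " st.2] else st.1
  PySem.Str.join "\n" sentences

-- ===== PRECONDITION & SPEC =====
def Spec_process_all_subtitles_py (lines : List String) (out : String) : Prop := out = process_all_subtitles_py_alt lines
instance (lines : List String) (out : String) : Decidable (Spec_process_all_subtitles_py lines out) := by unfold Spec_process_all_subtitles_py; infer_instance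

-- ===== CLAIM (what is proved, stated in full; the proofs are below) =====
def Claim_equal_process_all_subtitles_py : Prop := ∀ (lines : List String), Dom_process_all_subtitles_py lines → Spec_process_all_subtitles_py lines (process_all_subtitles_py lines)

-- ===== LEMMAS AND PROOFS =====

-- invariant linking A's current_text with B's pending group
def PendInv (acc : List String) (cur : String) : Prop :=
  cur = PySem.Str.join " " acc ∧ (acc = [] ↔ cur = "") ∧
  (acc ≠ [] → PySem.Str.endswith cur "." = false)

lemma chars_join_snoc (sep t : List Char) (xs : List (List Char)) :
    PySem.Chars.join sep (xs ++ [t]) =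
      if xs = [] then t else PySem.Chars.join sep xs ++ sep ++ t := by
  induction xs with
  | nil => simp [PySem.Chars.join_singleton]
  | cons x xs ih =>
    cases xs with
    | nil => simp [PySem.Chars.join_cons_cons, PySem.Chars.join_singleton]
    | cons y r =>
      simp only [List.cons_append, PySem.Chars.join_cons_cons] at *
      simp [ih, List.append_assoc]

lemma str_join_snoc (t : String) (xs : List String) :
    PySem.Str.join " " (xs ++ [t]) =
      if xs = [] then t else PySem.Str.join " " xs ++ " " ++ t := by
  apply String.toList_inj.mp
  split_ifs with h
  · subst h; simp [PySem.Str.toList_join]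
  · simp [PySem.Str.toList_join, chars_join_snoc, h]

lemma str_join_nil : PySem.Str.join " " ([] : List String) = "" := by
  apply String.toList_inj.mp
  simp [PySem.Str.toList_join, PySem.Chars.join_nil]

lemma str_append_ne_empty (s t : String) (ht : t ≠ "") : s ++ t ≠ "" := by
  intro h
  apply ht
  apply String.toList_inj.mp
  have := congrArg String.toList h
  simp at this
  simp [this.2]

lemma suffix_dot_append (u t : List Char) (ht : t ≠ []) :
    (['.'] <:+ u ++ t) ↔ (['.'] <:+ t) := by
  constructor
  · rintro ⟨v, hv⟩
    have h1 : (u ++ t).getLast? = some '.' := by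
      rw [← hv, List.getLast?_append_of_ne_nil v (by simp)]
      rfl
    rw [List.getLast?_append_of_ne_nil u ht] at h1
    rw [List.getLast?_eq_some_getLast ht, Option.some_inj] at h1
    refine ⟨t.dropLast, ?_⟩
    rw [← h1]
    exact List.dropLast_append_getLast ht
  · rintro ⟨v, hv⟩
    exact ⟨u ++ v, by simp [hv]⟩

lemma endswith_dot_append (u t : String) (ht : t ≠ "") :
    PySem.Str.endswith (u ++ t) "." = PySem.Str.endswith t "." := by
  have htl : t.toList ≠ [] := by
    intro h; exact ht (String.toList_inj.mp (by simpa using h))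
  rw [Bool.eq_iff_iff, PySem.Str.endswith_eq, PySem.Str.endswith_eq,
      PySem.Chars.endswith_iff, PySem.Chars.endswith_iff]
  show (".".toList <:+ (u ++ t).toList) ↔ (".".toList <:+ t.toList)
  have hspl : (u ++ t).toList = u.toList ++ t.toList := by simp
  rw [hspl]
  exact suffix_dot_append u.toList t.toList htl

-- A's separator rule equals ' '.join on the pending group
lemma accum_eq_join (acc : List String) (cur t : String) (hinv : PendInv acc cur) (_ht : t ≠ "") :
    (if cur ≠ "" ∧ PySem.Str.endswith cur "." = false then cur ++ " " else cur) ++ t =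
      PySem.Str.join " " (acc ++ [t]) := by
  obtain ⟨h1, h2, h3⟩ := hinv
  rw [str_join_snoc]
  by_cases hacc : acc = []
  · have hcur : cur = "" := h2.mp hacc
    rw [if_pos hacc, if_neg (by simp [hcur]), hcur]
    simp
  · have hcur : cur ≠ "" := fun h => hacc (h2.mpr h)
    rw [if_neg hacc, if_pos ⟨hcur, h3 hacc⟩, h1]

lemma altContent_cons (l : String) (ls : List String) :
    altContent (l :: ls) =
      if altKeep l then PySem.Str.strip l :: altContent ls else altContent ls := by
  simp only [altContent, List.filter_cons]
  split_ifs with h <;> simp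

-- step lemmas for A's loop in started mode, proved without bridging to Chars
lemma stepA_blank (P : List String) (b : Bool) (cur l : String) (hb : PySem.Str.strip l = "") :
    pyStepA (P, b, cur) l = (P, b, cur) := by
  simp only [pyStepA]
  rw [if_pos hb]

lemma stepA_arrow (P : List String) (cur l : String) (hb : ¬ PySem.Str.strip l = "")
    (h : PySem.Str.isIn "-->" l = true) : pyStepA (P, true, cur) l = (P, true, cur) := by
  simp only [pyStepA, pyBodyA]
  rw [if_neg hb, if_neg (by simp), if_pos h]

lemma stepA_digit (P : List String) (cur l : String) (hb : ¬ PySem.Str.strip l = "")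
    (h : ¬ PySem.Str.isIn "-->" l = true) (hd : PySem.Str.strIsdigit (PySem.Str.strip l) = true) :
    pyStepA (P, true, cur) l = (P, true, cur) := by
  simp only [pyStepA, pyBodyA]
  rw [if_neg hb, if_neg (by simp), if_neg h, if_pos hd]

lemma stepA_content (P : List String) (cur l : String) (hb : ¬ PySem.Str.strip l = "")
    (h : ¬ PySem.Str.isIn "-->" l = true) (hd : ¬ PySem.Str.strIsdigit (PySem.Str.strip l) = true) :
    pyStepA (P, true, cur) l =
      (if PySem.Str.endswith (PySem.Str.strip l) "." then
        (P ++ [(if cur ≠ "" ∧ PySem.Str.endswith cur "." = false then cur ++ " " else cur) ++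
          PySem.Str.strip l], true, "")
      else (P, true,
        (if cur ≠ "" ∧ PySem.Str.endswith cur "." = false then cur ++ " " else cur) ++
          PySem.Str.strip l)) := by
  simp only [pyStepA, pyBodyA]
  rw [if_neg hb, if_neg (by simp), if_neg h, if_neg hd, if_pos hb]
  by_cases hdot : PySem.Str.endswith (PySem.Str.strip l) "." = true
  · rw [if_pos hdot, if_pos hdot]
  · rw [if_neg hdot, if_neg hdot]

lemma mainLem (ls : List String) : ∀ (P acc : List String) (cur : String), PendInv acc cur →
    ls.foldl pyStepA (P, true, cur) =
      (((altContent ls).foldl altGroupStep (P, acc)).1, true,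
        PySem.Str.join " " ((altContent ls).foldl altGroupStep (P, acc)).2)
    ∧ PendInv ((altContent ls).foldl altGroupStep (P, acc)).2
          (PySem.Str.join " " ((altContent ls).foldl altGroupStep (P, acc)).2) := by
  induction ls with
  | nil =>
    intro P acc cur hinv
    constructor
    · simp only [altContent, List.filter_nil, List.map_nil, List.foldl_nil]
      rw [← hinv.1]
    · simp only [altContent, List.filter_nil, List.map_nil, List.foldl_nil]
      exact hinv.1 ▸ hinv
  | cons l ls ih =>
    intro P acc cur hinv
    by_cases hb : PySem.Str.strip l = ""
    · have hk : altKeep l = false := by simp [altKeep, hb]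
      have hc : altContent (l :: ls) = altContent ls := by rw [altContent_cons, hk]; simp
      rw [hc, List.foldl_cons, stepA_blank P true cur l hb]
      exact ih P acc cur hinv
    · by_cases harrow : PySem.Str.isIn "-->" l = true
      · have harrowC : PySem.Chars.isIn ['-', '-', '>'] l.toList = true := by simpa using harrow
        have hk : altKeep l = false := by simp [altKeep, harrowC]
        have hc : altContent (l :: ls) = altContent ls := by rw [altContent_cons, hk]; simp
        rw [hc, List.foldl_cons, stepA_arrow P cur l hb harrow]
        exact ih P acc cur hinv
      · by_cases hdig : PySem.Str.strIsdigit (PySem.Str.strip l) = true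
        · have hdigC : PySem.Chars.strIsdigit (PySem.Chars.strip l.toList) = true := by
            simpa using hdig
          have hk : altKeep l = false := by simp [altKeep, hdigC]
          have hc : altContent (l :: ls) = altContent ls := by rw [altContent_cons, hk]; simp
          rw [hc, List.foldl_cons, stepA_digit P cur l hb harrow hdig]
          exact ih P acc cur hinv
        · have harrowC : PySem.Chars.isIn ['-', '-', '>'] l.toList = false := by simpa using harrow
          have hdigC : PySem.Chars.strIsdigit (PySem.Chars.strip l.toList) = false := by
            simpa using hdig
          have hk : altKeep l = true := by simp [altKeep, hb, harrowC, hdigC]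
          have hc : altContent (l :: ls) = PySem.Str.strip l :: altContent ls := by
            rw [altContent_cons, hk]; simp
          have hkey := accum_eq_join acc cur (PySem.Str.strip l) hinv hb
          rw [hc, List.foldl_cons, List.foldl_cons, stepA_content P cur l hb harrow hdig]
          by_cases hdot : PySem.Str.endswith (PySem.Str.strip l) "." = true
          · rw [show ((if PySem.Str.endswith (PySem.Str.strip l) "." then
                (P ++ [(if cur ≠ "" ∧ PySem.Str.endswith cur "." = false then cur ++ " " else cur) ++
                  PySem.Str.strip l], true, "")
              else (P, true,
                (if cur ≠ "" ∧ PySem.Str.endswith cur "." = false then cur ++ " " else cur) ++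
                  PySem.Str.strip l)) = (P ++ [PySem.Str.join " " (acc ++ [PySem.Str.strip l])], true, "")) by
                rw [if_pos hdot, hkey]]
            rw [show altGroupStep (P, acc) (PySem.Str.strip l) =
                  (P ++ [PySem.Str.join " " (acc ++ [PySem.Str.strip l])], []) by
              simp only [altGroupStep]; rw [if_pos hdot]]
            exact ih _ [] "" ⟨str_join_nil.symm, by simp, by simp⟩
          · rw [show ((if PySem.Str.endswith (PySem.Str.strip l) "." then
                (P ++ [(if cur ≠ "" ∧ PySem.Str.endswith cur "." = false then cur ++ " " else cur) ++
                  PySem.Str.strip l], true, "")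
              else (P, true,
                (if cur ≠ "" ∧ PySem.Str.endswith cur "." = false then cur ++ " " else cur) ++
                  PySem.Str.strip l)) = (P, true, PySem.Str.join " " (acc ++ [PySem.Str.strip l]))) by
                rw [if_neg hdot, hkey]]
            rw [show altGroupStep (P, acc) (PySem.Str.strip l) = (P, acc ++ [PySem.Str.strip l]) by
              simp only [altGroupStep]; rw [if_neg hdot]]
            refine ih P (acc ++ [PySem.Str.strip l]) _ ⟨rfl, ?_, ?_⟩
            · constructor
              · intro h; simp at h
              · intro h
                exfalso
                rw [← hkey] at h
                exact str_append_ne_empty _ _ hb h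
            · intro _
              rw [← hkey, endswith_dot_append _ _ hb]
              simpa using hdot

lemma headerLem (ls : List String) :
    ls.foldl pyStepA ([], false, "") = (altSkipHeader ls).foldl pyStepA ([], false, "") := by
  induction ls with
  | nil => rfl
  | cons l ls ih =>
    rw [altSkipHeader]
    by_cases h : (PySem.Str.strip l = "" || PySem.Str.startswith l "WEBVTT") = true
    · rw [if_pos h, List.foldl_cons,
        show pyStepA ([], false, "") l = ([], false, "") by
          by_cases hb : PySem.Str.strip l = ""
          · exact stepA_blank [] false "" l hb
          · have hw : PySem.Str.startswith l "WEBVTT" = true := by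
              rcases Bool.or_eq_true_iff.mp h with h1 | h1
              · exact absurd (of_decide_eq_true h1) hb
              · exact h1
            simp only [pyStepA]
            rw [if_neg hb, if_pos trivial,
              if_neg (fun hcon => absurd hcon.2 (by rw [hw]; simp))]]
      exact ih
    · rw [if_neg h]

lemma altSkipHeader_cons_prop (lines : List String) :
    ∀ l ls, altSkipHeader lines = l :: ls →
      PySem.Str.strip l ≠ "" ∧ PySem.Str.startswith l "WEBVTT" = false := by
  induction lines with
  | nil => intro l ls h; simp [altSkipHeader] at h
  | cons x xs ih =>
    intro l ls h
    rw [altSkipHeader] at h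
    by_cases hc : (PySem.Str.strip x = "" || PySem.Str.startswith x "WEBVTT") = true
    · rw [if_pos hc] at h; exact ih l ls h
    · rw [if_neg hc] at h
      simp only [Bool.or_eq_true_iff, not_or] at hc
      cases h
      exact ⟨by simpa using hc.1, by simpa using hc.2⟩

-- ===== VERDICT (by name: the statement is the Claim_ definition above) =====
theorem process_all_subtitles_py_spec : Claim_equal_process_all_subtitles_py := by
  intro lines _
  unfold Spec_process_all_subtitles_py process_all_subtitles_py process_all_subtitles_py_alt
  rw [headerLem]
  cases h : altSkipHeader lines with
  | nil => simp [altContent]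
  | cons l ls =>
    obtain ⟨hb, hw⟩ := altSkipHeader_cons_prop lines l ls h
    have hstep : pyStepA ([], false, "") l = pyStepA ([], true, "") l := by
      simp only [pyStepA]
      rw [if_neg hb, if_neg hb, if_pos trivial, if_pos ⟨hb, hw⟩, if_neg (by simp)]
    rw [List.foldl_cons, hstep, ← List.foldl_cons]
    have hinv : PendInv [] "" := ⟨str_join_nil.symm, by simp, by simp⟩
    obtain ⟨heq, hfin⟩ := mainLem (l :: ls) [] [] "" hinv
    rw [heq]
    obtain ⟨_, hiff, _⟩ := hfin
    by_cases hacc : ((altContent (l :: ls)).foldl altGroupStep ([], [])).2 = []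
    · simp [hacc, str_join_nil]
    · have hne : PySem.Str.join " " ((altContent (l :: ls)).foldl altGroupStep ([], [])).2 ≠ "" :=
        fun hc => hacc (hiff.mpr hc)
      simp [hacc, hne]
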